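-- pv_equiv track=rewrite | github.com/RaiiDeNx7/Roman-Calculator | stringManipulation.py | split_operators
-- ===== SOURCE A (Python) =====
-- def split_operators(s):
--     numbers = "IVXLCDM"
--     l = []
--     last_number = ""
--     for c in s:
--         if c in numbers:
--             last_number += c
--         else:
--             if last_number:
--                 l.append(last_number)
--                 last_number = ""
--             if c:
--                 l.append(c)
--     if last_number:
--         l.append(last_number)
--     return l
-- ===== SOURCE B (Python) =====
-- import re
--
-- def split_operators(s):
--     # Greedy alternation: a maximal run of roman-numeral chars, else any single char.
--     return re.findall(r'[IVXLCDM]+|[^IVXLCDM]', s)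
-- ===== Notes on version B (the rewrite author's own statement) =====
-- stated objective: idiomatic
-- what changed: Replaced the hand-rolled accumulator-and-flush state machine with a single declarative re.findall whose greedy alternation matches a maximal roman-numeral run or one other character.
import Mathlib
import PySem

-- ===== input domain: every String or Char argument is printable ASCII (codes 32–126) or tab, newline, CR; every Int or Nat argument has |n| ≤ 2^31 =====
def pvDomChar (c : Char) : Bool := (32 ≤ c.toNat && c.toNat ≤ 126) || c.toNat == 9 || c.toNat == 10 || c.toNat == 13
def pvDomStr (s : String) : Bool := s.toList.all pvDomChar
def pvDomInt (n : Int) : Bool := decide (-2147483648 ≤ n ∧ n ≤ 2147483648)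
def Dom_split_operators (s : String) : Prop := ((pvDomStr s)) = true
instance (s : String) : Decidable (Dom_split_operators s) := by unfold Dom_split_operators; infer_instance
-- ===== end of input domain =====

-- B replaces A's accumulator-and-flush state machine by a single regex findall
-- ('[IVXLCDM]+|[^IVXLCDM]'): more idiomatic, same cost.


-- ===== PORT A =====
-- c in "IVXLCDM"
def isRoman (c : Char) : Bool := c ∈ "IVXLCDM".toList

-- A's loop: tokens list `l` (as char lists) and pending run `last_number`.
-- In Python `if c:` is always true for a character of the string, so the else
-- branch always appends [c].
def aLoop (cs : List Char) (l : List (List Char)) (last : List Char) : List (List Char) :=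
  match cs with
  | [] => if last ≠ [] then l ++ [last] else l
  | c :: cs' =>
      if isRoman c then aLoop cs' l (last ++ [c])
      else aLoop cs' ((if last ≠ [] then l ++ [last] else l) ++ [[c]]) []

def split_operators (s : String) : List String :=
  (aLoop s.toList [] []).map String.mk

-- ===== PORT B =====
-- Hand port of re.findall(r'[IVXLCDM]+|[^IVXLCDM]', s): at each position the
-- greedy first alternative takes a maximal run of roman chars, otherwise one
-- character is consumed; exact for this regex on all ASCII input.
def reTokens (cs : List Char) : List (List Char) :=
  match cs with
  | [] => []
  | c :: rest =>
      if isRoman c then (c :: rest.takeWhile isRoman) :: reTokens (rest.dropWhile isRoman)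
      else [c] :: reTokens rest
termination_by cs.length
decreasing_by
  · exact Nat.lt_succ_of_le (List.length_dropWhile_le _ _)
  · exact Nat.lt_succ_self _

def split_operators_alt (s : String) : List String :=
  (reTokens s.toList).map String.mk

-- ===== PRECONDITION & SPEC =====
def Spec_split_operators (s : String) (out : List String) : Prop := out = split_operators_alt s
instance (s : String) (out : List String) : Decidable (Spec_split_operators s out) := by unfold Spec_split_operators; infer_instance

-- ===== CLAIM (what is proved, stated in full; the proofs are below) =====
def Claim_equal_split_operators : Prop := ∀ (s : String), Dom_split_operators s → Spec_split_operators s (split_operators s)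

-- ===== LEMMAS AND PROOFS =====

-- accumulator homomorphism for A's loop
theorem aLoop_acc (cs : List Char) (l : List (List Char)) (last : List Char) :
    aLoop cs l last = l ++ aLoop cs [] last := by
  induction cs generalizing l last with
  | nil =>
      simp only [aLoop]; split_ifs <;> simp
  | cons c cs ih =>
      simp only [aLoop]
      split_ifs with hc
      · exact ih l (last ++ [c])
      · rw [ih]
        conv_rhs => rw [ih]
        simp
      · rw [ih]
        conv_rhs => rw [ih]
        simp

-- main invariant: with a pending all-roman run `last`, A's loop from the empty
-- accumulator produces exactly the regex tokens of last ++ cs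
theorem aLoop_reTokens (cs : List Char) (last : List Char)
    (h : ∀ c ∈ last, isRoman c = true) :
    aLoop cs [] last = reTokens (last ++ cs) := by
  induction cs generalizing last with
  | nil =>
      simp only [aLoop, List.append_nil]
      match last with
      | [] => simp [reTokens]
      | c :: l =>
          have hc := h c (by simp)
          have hl : ∀ x ∈ l, isRoman x = true := fun x hx => h x (by simp [hx])
          simp [reTokens, hc, List.takeWhile_eq_self_iff.mpr hl,
            List.dropWhile_eq_nil_iff.mpr (fun x hx => hl x hx)]
  | cons c cs ih =>
      simp only [aLoop]
      split_ifs with hc hl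
      · have hall : ∀ x ∈ last ++ [c], isRoman x = true := by
          intro x hx
          rcases List.mem_append.mp hx with h1 | h1
          · exact h x h1
          · simp at h1; subst h1; exact hc
        rw [ih (last ++ [c]) hall, List.append_assoc]
        rfl
      · -- c not roman, last ≠ []
        obtain ⟨d, l, rfl⟩ := List.exists_cons_of_ne_nil hl
        rw [aLoop_acc, ih [] (by simp)]
        have hd := h d (by simp)
        have hlr : ∀ x ∈ l, isRoman x = true := fun x hx => h x (by simp [hx])
        rw [List.cons_append, reTokens]
        simp only [hd, if_true]
        rw [List.takeWhile_append, List.dropWhile_append]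
        simp [List.takeWhile_eq_self_iff.mpr hlr,
          List.dropWhile_eq_nil_iff.mpr (fun x hx => hlr x hx), reTokens, hc]
      · -- c not roman, last = []
        rw [aLoop_acc, ih [] (by simp)]
        simp at hl
        simp [hl, reTokens, hc]

-- ===== VERDICT (by name: the statement is the Claim_ definition above) =====
theorem split_operators_spec : Claim_equal_split_operators := by
  intro s _
  unfold Spec_split_operators split_operators split_operators_alt
  rw [aLoop_reTokens _ [] (by simp)]
  simp
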